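-- pv_equiv track=rewrite | github.com/gcman/project-euler | 78-Coin-Partitions/main.py | pent
-- ===== SOURCE A (Python) =====
-- def pent(n):
-- 	out = [1]
-- 	i = 1
-- 	sign = True
-- 	while out[-1] <= n:
-- 		i += 1
-- 		sign = not sign
-- 		k = i//2*(-1)**int(sign)
-- 		out.append(k*(3*k - 1)//2)
-- 	del out[0]
-- 	return out
-- ===== SOURCE B (Python) =====
-- def pent(n):
--     # First-difference recurrence: the j-th generalized pentagonal number exceeds
--     # the previous one by j when j is odd and by j//2 when j is even, so we keep a
--     # running term and add the next increment -- no k(3k+/-1)//2 formula, no signs.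
--     if n < 1:
--         return []
--     out = []
--     t = 1
--     j = 1
--     while True:
--         out.append(t)
--         if t > n:
--             return out
--         j += 1
--         t += j // 2 if j % 2 == 0 else j
-- ===== Notes on version B (the rewrite author's own statement) =====
-- stated objective: alternative
-- what changed: B abandons A's closed-form generation (sign-toggled k and a quadratic formula per step) for a first-difference recurrence: it keeps only a running term and adds the j-th gap (the index itself when odd, half of it when even), producing the same sequence with no pentagonal formula, no sign toggle and no multiplication.
import Mathlib
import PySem

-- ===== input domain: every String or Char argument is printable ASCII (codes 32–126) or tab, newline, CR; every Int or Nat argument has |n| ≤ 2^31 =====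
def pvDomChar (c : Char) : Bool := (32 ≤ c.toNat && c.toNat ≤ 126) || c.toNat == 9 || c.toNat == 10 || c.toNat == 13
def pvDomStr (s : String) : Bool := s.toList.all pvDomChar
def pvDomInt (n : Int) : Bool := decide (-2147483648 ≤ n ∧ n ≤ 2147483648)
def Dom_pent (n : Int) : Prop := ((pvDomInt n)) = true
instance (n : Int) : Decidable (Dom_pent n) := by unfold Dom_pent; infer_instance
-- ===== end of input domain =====

-- B replaces A's closed-form generation (sign-toggled k with a quadratic formula each step)
-- by a first-difference recurrence adding the j-th gap (the index when odd, half of it when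
-- even) to a running term (objective: alternative).

-- ===== PORT A =====
-- the while loop of A; fuel is only a totality guard ((n+1).toNat + 1 always suffices).
-- `out` is kept in reversed order (Python's O(1) append = cons here; out[-1] = head),
-- and reversed once at the end.
def pentLoop (fuel : Nat) (n : Int) (out : List Int) (i : Int) (sign : Bool) : List Int :=
  match fuel with
  | 0 => out
  | fuel + 1 =>
    if out.headD 0 ≤ n then
      let i' := i + 1
      let sign' := !sign
      let k := PySem.Int.floordiv i' 2 * (-1 : Int) ^ (if sign' then 1 else 0)
      pentLoop fuel n (PySem.Int.floordiv (k * (3 * k - 1)) 2 :: out) i' sign'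
    else out

def pent (n : Int) : List Int :=
  ((pentLoop ((n + 1).toNat + 1) n [1] 1 true).reverse).drop 1   -- final .drop 1 = `del out[0]`

-- ===== PORT B =====
-- (same reversed-accumulator convention: append = cons, reverse at the end)
def pentAltLoop (fuel : Nat) (n : Int) (t j : Int) (out : List Int) : List Int :=
  match fuel with
  | 0 => out
  | fuel + 1 =>
    let out1 := t :: out
    if t > n then out1
    else
      let j' := j + 1
      let t' := t + (if PySem.Int.mod j' 2 == 0 then PySem.Int.floordiv j' 2 else j')
      pentAltLoop fuel n t' j' out1

def pent_alt (n : Int) : List Int :=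
  if n < 1 then [] else (pentAltLoop ((n + 1).toNat + 1) n 1 1 []).reverse

-- ===== PRECONDITION & SPEC =====
def Spec_pent (n : Int) (out : List Int) : Prop := out = pent_alt n
instance (n : Int) (out : List Int) : Decidable (Spec_pent n out) := by unfold Spec_pent; infer_instance

-- ===== CLAIM (what is proved, stated in full; the proofs are below) =====
def Claim_equal_pent : Prop := ∀ (n : Int), Dom_pent n → Spec_pent n (pent n)

-- ===== LEMMAS AND PROOFS =====

-- canonical sequence of generalized pentagonal numbers (gp 0 = 1 doubles as A's sentinel):
-- gp 1, gp 2, ... = 1, 2, 5, 7, 12, 15, ...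
def gp : Nat → Int
  | 0 => 1
  | 1 => 1
  | (j + 2) => gp (j + 1) + (if (j + 2) % 2 == 0 then ((j + 2) / 2 : Nat) else (j + 2 : Nat))

lemma gp_ge (c : Nat) : (c : Int) ≤ gp c := by
  induction c with
  | zero => simp [gp]
  | succ j ih =>
    match j, ih with
    | 0, _ => simp [gp]
    | (j + 1), ih =>
      rw [gp]
      split <;> push_cast <;> push_cast at ih <;> omega

lemma gp_odd_succ (m : Nat) : gp (2 * m + 3) = gp (2 * m + 2) + ((2 * m + 3 : Nat) : Int) := by
  have h : (2 * m + 1 + 2) % 2 = 1 := by omega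
  rw [show 2 * m + 3 = 2 * m + 1 + 2 from by omega, gp, h]
  norm_num

lemma gp_even_succ (m : Nat) : gp (2 * m + 4) = gp (2 * m + 3) + ((m + 2 : Nat) : Int) := by
  have h : (2 * m + 2 + 2) % 2 = 0 := by omega
  have hd : (2 * m + 2 + 2) / 2 = m + 2 := by omega
  rw [show 2 * m + 4 = 2 * m + 2 + 2 from by omega, gp, h, hd]
  norm_num

lemma gp_closed (m : Nat) :
    2 * gp (2 * m + 1) = ((m : Int) + 1) * (3 * m + 2) ∧
    2 * gp (2 * m + 2) = ((m : Int) + 1) * (3 * m + 4) := by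
  induction m with
  | zero => norm_num [gp]
  | succ m ih =>
    obtain ⟨ih1, ih2⟩ := ih
    have ho := gp_odd_succ m
    have he := gp_even_succ m
    constructor
    · rw [show 2 * (m + 1) + 1 = 2 * m + 3 from by omega, ho]
      push_cast
      linear_combination ih2
    · rw [show 2 * (m + 1) + 2 = 2 * m + 4 from by omega, he, ho]
      push_cast
      linear_combination ih2

lemma fdiv_two_double (y : Int) : PySem.Int.floordiv (2 * y) 2 = y := by
  rw [PySem.Int.floordiv_eq_ediv_of_pos (by omega)]
  omega

lemma sign_flip (c : Nat) : (!(c % 2 == 0)) = ((c + 1) % 2 == 0) := by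
  rcases Nat.even_or_odd c with ⟨m, hm⟩ | ⟨m, hm⟩ <;> subst hm
  · have h1 : (m + m) % 2 = 0 := by omega
    have h2 : (m + m + 1) % 2 = 1 := by omega
    simp [h1, h2]
  · have h1 : (2 * m + 1) % 2 = 1 := by omega
    have h2 : (2 * m + 1 + 1) % 2 = 0 := by omega
    simp [h1, h2]

-- canonical tail: values gp (c+1), gp (c+2), ... while the predecessor gp c is still ≤ n
def rest (n : Int) (c : Nat) : List Int :=
  if gp c ≤ n then gp (c + 1) :: rest n (c + 1) else []
termination_by (n + 1 - c).toNat
decreasing_by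
  have := gp_ge c
  rename_i h
  omega

-- the value A appends from loop-state c equals gp (c + 1)
lemma step_val (c : Nat) :
    PySem.Int.floordiv
      ((PySem.Int.floordiv ((c : Int) + 2) 2 * (-1 : Int) ^ (if (!(c % 2 == 0)) then 1 else 0)) *
        (3 * (PySem.Int.floordiv ((c : Int) + 2) 2 * (-1 : Int) ^ (if (!(c % 2 == 0)) then 1 else 0)) - 1)) 2
      = gp (c + 1) := by
  rcases Nat.even_or_odd c with ⟨m, hm⟩ | ⟨m, hm⟩
  · -- c = 2m even: sign' = false, k = m+1, value = gp (2m+1)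
    subst hm
    have hpar : (m + m) % 2 = 0 := by omega
    have hk : PySem.Int.floordiv ((↑(m + m) : Int) + 2) 2 = (m : Int) + 1 := by
      rw [PySem.Int.floordiv_eq_ediv_of_pos (by omega)]; push_cast; omega
    have hval : ((m : Int) + 1) * (3 * ((m : Int) + 1) - 1) = 2 * gp (2 * m + 1) := by
      rw [(gp_closed m).1]; ring
    rw [show m + m + 1 = 2 * m + 1 from by omega,
      if_neg (by simp [hpar] : ¬ ((!((m + m) % 2 == 0)) = true)), pow_zero, mul_one, hk,
      hval, fdiv_two_double]
  · -- c = 2m+1 odd: sign' = true, k = -(m+1), value = gp (2m+2)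
    subst hm
    have hpar : (2 * m + 1) % 2 = 1 := by omega
    have hk : PySem.Int.floordiv ((↑(2 * m + 1) : Int) + 2) 2 = (m : Int) + 1 := by
      rw [PySem.Int.floordiv_eq_ediv_of_pos (by omega)]; push_cast; omega
    have hval : (-((m : Int) + 1)) * (3 * (-((m : Int) + 1)) - 1) = 2 * gp (2 * m + 2) := by
      rw [(gp_closed m).2]; ring
    rw [show 2 * m + 1 + 1 = 2 * m + 2 from by omega,
      if_pos (by simp [hpar] : ((!((2 * m + 1) % 2 == 0)) = true)), pow_one, hk,
      mul_neg_one, hval, fdiv_two_double]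

lemma loopA (fuel : Nat) : ∀ (c : Nat) (rpre : List Int) (n : Int),
    (n + 1 - c).toNat < fuel →
    pentLoop fuel n (gp c :: rpre) ((c : Int) + 1) (c % 2 == 0) =
      (rest n c).reverse ++ (gp c :: rpre) := by
  induction fuel with
  | zero => intro c rpre n h; omega
  | succ fuel ih =>
    intro c rpre n h
    rw [pentLoop, rest]
    simp only [List.headD_cons]
    by_cases hle : gp c ≤ n
    · rw [if_pos hle, if_pos hle]
      have hge := gp_ge c
      simp only [show (c : Int) + 1 + 1 = ((c : Nat) : Int) + 2 from by ring]
      rw [step_val c, sign_flip c,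
        show ((c : Nat) : Int) + 2 = ((c + 1 : Nat) : Int) + 1 from by push_cast; ring]
      have := ih (c + 1) (gp c :: rpre) n (by push_cast; omega)
      rw [this]
      simp
    · rw [if_neg hle, if_neg hle]
      simp

-- B's increment from index j = c+1 (c ≥ 1) reproduces gp's recurrence step
lemma step_val_B (c : Nat) (hc : 1 ≤ c) :
    gp c + (if PySem.Int.mod ((c + 1 : Nat) : Int) 2 == 0
            then PySem.Int.floordiv ((c + 1 : Nat) : Int) 2 else ((c + 1 : Nat) : Int)) = gp (c + 1) := by
  obtain ⟨j, rfl⟩ : ∃ j, c = j + 1 := ⟨c - 1, by omega⟩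
  have hmod : PySem.Int.mod ((↑(j + 1 + 1) : Nat) : Int) 2 = (((j + 2) % 2 : Nat) : Int) := by
    rw [PySem.Int.mod_eq_emod_of_pos (by omega)]; push_cast; omega
  have hdiv : PySem.Int.floordiv ((↑(j + 1 + 1) : Nat) : Int) 2 = (((j + 2) / 2 : Nat) : Int) := by
    rw [PySem.Int.floordiv_eq_ediv_of_pos (by omega)]; push_cast; omega
  rw [show j + 1 + 1 = j + 2 from rfl, gp, hmod, hdiv]
  by_cases h : (j + 2) % 2 = 0
  · simp [h]
  · have h1 : (j + 2) % 2 = 1 := by omega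
    simp [h1]

lemma loopB (fuel : Nat) : ∀ (c : Nat) (acc : List Int) (n : Int), 1 ≤ c →
    (n + 1 - gp c).toNat < fuel →
    pentAltLoop fuel n (gp c) (c : Int) acc = (gp c :: rest n c).reverse ++ acc := by
  induction fuel with
  | zero =>
    intro c acc n hc h
    omega
  | succ fuel ih =>
    intro c acc n hc h
    rw [pentAltLoop, rest]
    by_cases hle : gp c ≤ n
    · rw [if_neg (by omega), if_pos hle]
      simp only [show (c : Int) + 1 = ((c + 1 : Nat) : Int) from by push_cast; ring]
      rw [step_val_B c hc]
      have hmono : gp c + 1 ≤ gp (c + 1) := by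
        rw [← step_val_B c hc]
        have hdiv2 := PySem.Int.floordiv_eq_ediv_of_pos (a := ((c + 1 : Nat) : Int)) (b := 2) (by omega)
        split <;> omega
      have := ih (c + 1) (gp c :: acc) n (by omega) (by omega)
      rw [this]
      simp
    · rw [if_pos (by omega), if_neg hle]
      simp

-- ===== VERDICT (by name: the statement is the Claim_ definition above) =====
theorem pent_spec : Claim_equal_pent := by
  intro n _
  unfold Spec_pent pent pent_alt
  have hA : pentLoop ((n + 1).toNat + 1) n [1] 1 true = (rest n 0).reverse ++ [gp 0] := by
    have := loopA ((n + 1).toNat + 1) 0 [] n (by omega)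
    simpa [gp] using this
  rw [hA]
  by_cases hn : n < 1
  · rw [if_pos hn]
    rw [show rest n 0 = [] from by rw [rest, if_neg (by simp [gp]; omega)]]
    simp
  · rw [if_neg hn]
    have hB := loopB ((n + 1).toNat + 1) 1 [] n (by omega) (by have h1 : gp 1 = 1 := rfl; omega)
    rw [show ((1 : Nat) : Int) = (1 : Int) from rfl] at hB
    rw [show gp 1 = (1 : Int) from rfl] at hB
    rw [hB]
    rw [show rest n 0 = gp 1 :: rest n 1 from by rw [rest, if_pos (by simp [gp]; omega)]]
    simp [gp]
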